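-- pv_equiv track=rewrite | github.com/linyueqian/VERA | models/realtime/sonic.py | parse_mrcr_context
-- ===== SOURCE A (Python) =====
-- def parse_mrcr_context(context: str):
--     """Parse MRCR context document into conversation messages: [{'role': 'user'|'assistant', 'content': str}, ...]"""
--     lines = context.splitlines()
--     messages, current_role, current_content = [], None, []
--     for line in lines:
--         if line.startswith("User:"):
--             if current_role and current_content:
--                 messages.append({"role": current_role, "content": "\n".join(current_content).strip()})
--             current_role, current_content = "user", [line[5:].strip()]
--         elif line.startswith("Assistant:"):
--             if current_role and current_content:
--                 messages.append({"role": current_role, "content": "\n".join(current_content).strip()})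
--             current_role, current_content = "assistant", [line[10:].strip()]
--         else:
--             current_content.append(line)
--     if current_role and current_content:
--         messages.append({"role": current_role, "content": "\n".join(current_content).strip()})
--     return messages
-- ===== SOURCE B (Python) =====
-- def parse_mrcr_context(context: str):
--     """Parse MRCR context document into conversation messages: [{'role': 'user'|'assistant', 'content': str}, ...]"""
--     lines = context.splitlines()
--
--     def marker(line):
--         if line.startswith("User:"):
--             return ("user", line[5:].strip())
--         if line.startswith("Assistant:"):
--             return ("assistant", line[10:].strip())
--         return None
--
--     messages = []
--     i, n = 0, len(lines)
--     while i < n: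
--         m = marker(lines[i])
--         i += 1
--         if m is None:
--             continue
--         role, head = m
--         j = i
--         while j < n and marker(lines[j]) is None:
--             j += 1
--         messages.append({"role": role, "content": "\n".join([head] + lines[i:j]).strip()})
--         i = j
--     return messages
-- ===== Notes on version B (the rewrite author's own statement) =====
-- stated objective: alternative
-- what changed: Replaces A's single-pass state machine (a role/content accumulator flushed when the NEXT marker or the end of input is seen) with a nested segment scanner: an outer loop finds each marker line, an inner scan collects that segment's body lines up to the next marker, and the message is emitted immediately, with no carried role/content state and no final flush.
import Mathlib
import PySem

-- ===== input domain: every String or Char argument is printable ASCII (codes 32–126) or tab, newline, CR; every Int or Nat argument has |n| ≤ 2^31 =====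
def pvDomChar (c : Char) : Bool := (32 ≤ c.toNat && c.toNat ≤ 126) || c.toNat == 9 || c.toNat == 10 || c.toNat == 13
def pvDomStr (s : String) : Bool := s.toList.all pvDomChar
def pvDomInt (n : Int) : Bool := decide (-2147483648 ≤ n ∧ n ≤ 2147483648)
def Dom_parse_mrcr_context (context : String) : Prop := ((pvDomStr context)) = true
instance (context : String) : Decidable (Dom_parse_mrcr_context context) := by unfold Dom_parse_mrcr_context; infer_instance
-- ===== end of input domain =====

-- B re-implements A's marker/segment parsing as a nested segment scanner instead of A's
-- flush-on-next-marker state machine; same return value, no speed claim (objective: alternative).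

-- ===== PORT A =====
-- A's thrice-repeated `if current_role and current_content: messages.append(...)` block:
def flushA (messages : List (List (String × String))) (role? : Option String)
    (content : List String) : List (List (String × String)) :=
  match role? with
  | some r =>
      if content.isEmpty then messages
      else messages ++ [[("role", r), ("content", PySem.Str.strip (PySem.Str.join "\n" content))]]
  | none => messages

-- the body of A's `for line in lines` loop, over the state (messages, current_role, current_content):
def stepA (st : List (List (String × String)) × Option String × List String) (line : String) :
    List (List (String × String)) × Option String × List String :=
  if PySem.Str.startswith line "User:" then
    (flushA st.1 st.2.1 st.2.2, some "user", [PySem.Str.strip (PySem.Str.slice line (some 5) none)])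
  else if PySem.Str.startswith line "Assistant:" then
    (flushA st.1 st.2.1 st.2.2, some "assistant", [PySem.Str.strip (PySem.Str.slice line (some 10) none)])
  else (st.1, st.2.1, st.2.2 ++ [line])

def parse_mrcr_context (context : String) : List (List (String × String)) :=
  let st := (PySem.Str.splitlines context).foldl stepA ([], none, [])
  flushA st.1 st.2.1 st.2.2

-- ===== PORT B =====
-- Source B's `marker`:
def markerB (line : String) : Option (String × String) :=
  if PySem.Str.startswith line "User:" then
    some ("user", PySem.Str.strip (PySem.Str.slice line (some 5) none))
  else if PySem.Str.startswith line "Assistant:" then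
    some ("assistant", PySem.Str.strip (PySem.Str.slice line (some 10) none))
  else none

-- Source B's outer `while` over the remaining lines; the inner `while j < n and marker(lines[j]) is None`
-- scan is the takeWhile/dropWhile split of the remaining lines at the next marker:
def parseSegs : List String → List (List (String × String))
  | [] => []
  | l :: rest =>
    match markerB l with
    | none => parseSegs rest
    | some rh =>
        [("role", rh.1), ("content", PySem.Str.strip (PySem.Str.join "\n"
            (rh.2 :: rest.takeWhile (fun x => (markerB x).isNone))))]
          :: parseSegs (rest.dropWhile (fun x => (markerB x).isNone))
termination_by ls => ls.length
decreasing_by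
  · simp
  · have h := List.length_dropWhile_le (fun x => (markerB x).isNone) rest
    simp; omega

def parse_mrcr_context_alt (context : String) : List (List (String × String)) :=
  parseSegs (PySem.Str.splitlines context)

-- ===== PRECONDITION & SPEC =====
def Spec_parse_mrcr_context (context : String) (out : List (List (String × String))) : Prop := out = parse_mrcr_context_alt context
instance (context : String) (out : List (List (String × String))) : Decidable (Spec_parse_mrcr_context context out) := by unfold Spec_parse_mrcr_context; infer_instance

-- ===== CLAIM (what is proved, stated in full; the proofs are below) =====
def Claim_equal_parse_mrcr_context : Prop := ∀ (context : String), Dom_parse_mrcr_context context → Spec_parse_mrcr_context context (parse_mrcr_context context)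

-- ===== LEMMAS AND PROOFS =====

theorem flushA_none_role (msgs : List (List (String × String))) (content : List String) :
    flushA msgs none content = msgs := rfl

theorem flushA_some_role (msgs : List (List (String × String))) (r : String)
    (content : List String) (hc : content ≠ []) :
    flushA msgs (some r) content =
      msgs ++ [[("role", r), ("content", PySem.Str.strip (PySem.Str.join "\n" content))]] := by
  simp [flushA, hc]

theorem markerB_user (l : String) (hu : PySem.Str.startswith l "User:" = true) :
    markerB l = some ("user", PySem.Str.strip (PySem.Str.slice l (some 5) none)) := by
  unfold markerB
  rw [if_pos hu]

theorem markerB_assistant (l : String) (hu : ¬ PySem.Str.startswith l "User:" = true)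
    (ha : PySem.Str.startswith l "Assistant:" = true) :
    markerB l = some ("assistant", PySem.Str.strip (PySem.Str.slice l (some 10) none)) := by
  unfold markerB
  rw [if_neg hu, if_pos ha]

theorem markerB_other (l : String) (hu : ¬ PySem.Str.startswith l "User:" = true)
    (ha : ¬ PySem.Str.startswith l "Assistant:" = true) :
    markerB l = none := by
  unfold markerB
  rw [if_neg hu, if_neg ha]

theorem stepA_user (msgs : List (List (String × String))) (ro : Option String)
    (co : List String) (l : String) (hu : PySem.Str.startswith l "User:" = true) :
    stepA (msgs, ro, co) l = (flushA msgs ro co, some "user",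
      [PySem.Str.strip (PySem.Str.slice l (some 5) none)]) := by
  unfold stepA
  rw [if_pos hu]

theorem stepA_assistant (msgs : List (List (String × String))) (ro : Option String)
    (co : List String) (l : String) (hu : ¬ PySem.Str.startswith l "User:" = true)
    (ha : PySem.Str.startswith l "Assistant:" = true) :
    stepA (msgs, ro, co) l = (flushA msgs ro co, some "assistant",
      [PySem.Str.strip (PySem.Str.slice l (some 10) none)]) := by
  unfold stepA
  rw [if_neg hu, if_pos ha]

theorem stepA_other (msgs : List (List (String × String))) (ro : Option String)
    (co : List String) (l : String) (hu : ¬ PySem.Str.startswith l "User:" = true)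
    (ha : ¬ PySem.Str.startswith l "Assistant:" = true) :
    stepA (msgs, ro, co) l = (msgs, ro, co ++ [l]) := by
  unfold stepA
  rw [if_neg hu, if_neg ha]

theorem parseSegs_nil : parseSegs [] = [] := by
  rw [parseSegs.eq_def]

theorem parseSegs_cons_none (l : String) (ls : List String) (hm : markerB l = none) :
    parseSegs (l :: ls) = parseSegs ls := by
  rw [parseSegs.eq_def]
  simp [hm]

theorem parseSegs_cons_some (l : String) (ls : List String) (rh : String × String)
    (hm : markerB l = some rh) :
    parseSegs (l :: ls) =
      [("role", rh.1), ("content", PySem.Str.strip (PySem.Str.join "\n"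
          (rh.2 :: ls.takeWhile (fun x => (markerB x).isNone))))]
        :: parseSegs (ls.dropWhile (fun x => (markerB x).isNone)) := by
  rw [parseSegs.eq_def]
  simp [hm]

-- running A's loop from a state that holds an open segment (role r, nonempty content) emits that
-- segment extended by the body lines up to the next marker, then parses the rest as B does:
theorem foldA_some (ls : List String) (msgs : List (List (String × String))) (r : String)
    (content : List String) (hc : content ≠ []) :
    (fun st => flushA st.1 st.2.1 st.2.2) (ls.foldl stepA (msgs, some r, content)) =
      msgs ++ [("role", r), ("content", PySem.Str.strip (PySem.Str.join "\n"
          (content ++ ls.takeWhile (fun x => (markerB x).isNone))))]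
        :: parseSegs (ls.dropWhile (fun x => (markerB x).isNone)) := by
  induction ls generalizing msgs r content with
  | nil => simp [flushA_some_role _ _ _ hc, parseSegs_nil]
  | cons l ls ih =>
    by_cases hu : PySem.Str.startswith l "User:" = true
    · rw [List.foldl_cons, stepA_user _ _ _ _ hu, flushA_some_role _ _ _ hc,
          ih _ _ _ (by simp),
          List.takeWhile_cons_of_neg (by simp [markerB_user l hu]),
          List.dropWhile_cons_of_neg (by simp [markerB_user l hu]),
          parseSegs_cons_some l ls _ (markerB_user l hu)]
      simp
    · by_cases ha : PySem.Str.startswith l "Assistant:" = true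
      · rw [List.foldl_cons, stepA_assistant _ _ _ _ hu ha, flushA_some_role _ _ _ hc,
            ih _ _ _ (by simp),
            List.takeWhile_cons_of_neg (by simp [markerB_assistant l hu ha]),
            List.dropWhile_cons_of_neg (by simp [markerB_assistant l hu ha]),
            parseSegs_cons_some l ls _ (markerB_assistant l hu ha)]
        simp
      · rw [List.foldl_cons, stepA_other _ _ _ _ hu ha,
            ih _ _ _ (by simp),
            List.takeWhile_cons_of_pos (by simp [markerB_other l hu ha]),
            List.dropWhile_cons_of_pos (by simp [markerB_other l hu ha])]
        simp

-- running A's loop with no role yet drops the pending content and agrees with B's parser: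
theorem foldA_none (ls : List String) (msgs : List (List (String × String)))
    (content : List String) :
    (fun st => flushA st.1 st.2.1 st.2.2) (ls.foldl stepA (msgs, none, content)) =
      msgs ++ parseSegs ls := by
  induction ls generalizing msgs content with
  | nil => simp [flushA_none_role, parseSegs_nil]
  | cons l ls ih =>
    by_cases hu : PySem.Str.startswith l "User:" = true
    · rw [List.foldl_cons, stepA_user _ _ _ _ hu, flushA_none_role,
          foldA_some _ _ _ _ (by simp),
          parseSegs_cons_some l ls _ (markerB_user l hu)]
      simp
    · by_cases ha : PySem.Str.startswith l "Assistant:" = true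
      · rw [List.foldl_cons, stepA_assistant _ _ _ _ hu ha, flushA_none_role,
            foldA_some _ _ _ _ (by simp),
            parseSegs_cons_some l ls _ (markerB_assistant l hu ha)]
        simp
      · rw [List.foldl_cons, stepA_other _ _ _ _ hu ha, ih,
            parseSegs_cons_none l ls (markerB_other l hu ha)]

-- ===== VERDICT (by name: the statement is the Claim_ definition above) =====
theorem parse_mrcr_context_spec : Claim_equal_parse_mrcr_context := by
  intro context _
  unfold Spec_parse_mrcr_context parse_mrcr_context parse_mrcr_context_alt
  simpa using foldA_none (PySem.Str.splitlines context) [] []
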